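-- pv_equiv track=rewrite | github.com/ALonelyTower/DnD5E_SqlMaker | generate_database.py | _extract_sql_from_database_creation
-- ===== SOURCE A (Python) =====
-- def _extract_sql_from_database_creation(raw_text_lines):
--     """Not meant to be a generic extractor.  Made specifically for a specific file."""
--     cleaned_lines = []
--     for line in raw_text_lines:
--         sans_new_strings = line.replace('\n', '')
--         sans_tabs = sans_new_strings.replace('\t', '')
--         cleaned_lines.append(sans_tabs)
--
--     sql_queries = []
--     sql_query = []
--     for line in cleaned_lines:
--         if line == '':
--             sql_queries.append(''.join(sql_query))
--             sql_query.clear()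
--         else:
--             sql_query.append(line)
--     sql_queries.append(''.join(sql_query))
--
--     return sql_queries
-- ===== SOURCE B (Python) =====
-- def _extract_sql_from_database_creation(raw_text_lines):
--     """Clean the lines, then slice the cleaned list between blank-line boundaries."""
--     cleaned = [line.replace('\n', '').replace('\t', '') for line in raw_text_lines]
--     queries = []
--     start = 0
--     for i, line in enumerate(cleaned):
--         if line == '':
--             queries.append(''.join(cleaned[start:i]))
--             start = i + 1
--     queries.append(''.join(cleaned[start:]))
--     return queries
-- ===== Notes on version B (the rewrite author's own statement) =====
-- stated objective: alternative
-- what changed: Instead of A's accumulator that is flushed and cleared at each blank line, B cleans all lines first and then walks the cleaned list once by index, joining the slice between consecutive blank-line boundaries (plus the final slice to the end).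
import Mathlib
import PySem

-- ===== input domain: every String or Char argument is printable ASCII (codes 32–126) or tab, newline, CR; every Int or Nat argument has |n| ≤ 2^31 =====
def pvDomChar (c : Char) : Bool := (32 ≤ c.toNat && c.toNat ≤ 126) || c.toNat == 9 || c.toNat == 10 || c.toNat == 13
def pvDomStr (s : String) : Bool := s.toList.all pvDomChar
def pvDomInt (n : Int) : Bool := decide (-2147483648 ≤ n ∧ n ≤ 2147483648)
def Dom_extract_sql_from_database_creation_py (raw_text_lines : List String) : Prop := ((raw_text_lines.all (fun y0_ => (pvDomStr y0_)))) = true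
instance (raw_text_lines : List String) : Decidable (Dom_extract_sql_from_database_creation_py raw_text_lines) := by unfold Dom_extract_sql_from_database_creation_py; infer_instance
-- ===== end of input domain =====

-- B cleans every line first, then scans the cleaned list once by index, joining the
-- slice between consecutive blank-line boundaries; A flushes and clears a running
-- accumulator at each blank line. Equal return value on all inputs (A is total).
-- ===== PORT A =====
def pvClean (s : String) : String :=
  PySem.Str.replace (PySem.Str.replace s "\n" "") "\t" ""

def extract_sql_from_database_creation_py (raw_text_lines : List String) : List String :=
  let cleaned_lines := raw_text_lines.foldl (fun acc line => acc ++ [pvClean line]) []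
  let st := cleaned_lines.foldl
    (fun (st : List String × List String) line =>
      if line = "" then (st.1 ++ [PySem.Str.join "" st.2], [])
      else (st.1, st.2 ++ [line])) ([], [])
  st.1 ++ [PySem.Str.join "" st.2]

-- ===== PORT B =====
def extract_sql_from_database_creation_py_alt (raw_text_lines : List String) : List String :=
  let cleaned := raw_text_lines.map pvClean
  let st := (PySem.List.enumerate cleaned).foldl
    (fun (st : List String × Int) (p : Int × String) =>
      if p.2 = "" then
        (st.1 ++ [PySem.Str.join "" (PySem.List.slice cleaned (some st.2) (some p.1))], p.1 + 1)
      else st) ([], 0)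
  st.1 ++ [PySem.Str.join "" (PySem.List.slice cleaned (some st.2) none)]

-- ===== PRECONDITION & SPEC =====
def Spec_extract_sql_from_database_creation_py (raw_text_lines : List String) (out : List String) : Prop := out = extract_sql_from_database_creation_py_alt raw_text_lines
instance (raw_text_lines : List String) (out : List String) : Decidable (Spec_extract_sql_from_database_creation_py raw_text_lines out) := by unfold Spec_extract_sql_from_database_creation_py; infer_instance

-- ===== CLAIM (what is proved, stated in full; the proofs are below) =====
def Claim_equal_extract_sql_from_database_creation_py : Prop := ∀ (raw_text_lines : List String), Dom_extract_sql_from_database_creation_py raw_text_lines → Spec_extract_sql_from_database_creation_py raw_text_lines (extract_sql_from_database_creation_py raw_text_lines)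

-- ===== LEMMAS AND PROOFS =====
-- segments of a cleaned suffix (proof-only characterisation shared by both loop lemmas)
def pvSeg (c : List String) : List (List String) :=
  c.foldr (fun s segs => if s = "" then [] :: segs else (s :: segs.headD []) :: segs.tail) [[]]

theorem pvSeg_ne_nil (c : List String) : pvSeg c ≠ [] := by
  induction c with
  | nil => simp [pvSeg]
  | cons x xs ih =>
    simp only [pvSeg, List.foldr_cons] at *
    split_ifs <;> simp_all

theorem headD_cons_tail {α : Type} (l : List α) (d : α) (h : l ≠ []) : l.headD d :: l.tail = l := by
  cases l with
  | nil => exact absurd rfl h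
  | cons a t => rfl

-- A's flush-and-clear loop, from any state, yields the joined segments with cur prefixed
theorem pvLoopA_eq (c : List String) : ∀ (qs cur : List String),
    (let st := c.foldl
      (fun (st : List String × List String) line =>
        if line = "" then (st.1 ++ [PySem.Str.join "" st.2], [])
        else (st.1, st.2 ++ [line])) (qs, cur)
     st.1 ++ [PySem.Str.join "" st.2])
    = qs ++ (((cur ++ (pvSeg c).headD []) :: (pvSeg c).tail).map (PySem.Str.join "")) := by
  induction c with
  | nil => intro qs cur; simp [pvSeg]
  | cons x xs ih =>
    intro qs cur
    by_cases hx : x = ""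
    · subst hx
      have hps : pvSeg ("" :: xs) = [] :: pvSeg xs := by simp [pvSeg]
      simp only [List.foldl_cons]
      rw [if_true, ih, hps]
      simp only [List.headD_cons, List.tail_cons, List.append_nil, List.map_cons,
        List.append_assoc, List.singleton_append]
      conv_rhs => rw [← headD_cons_tail (pvSeg xs) [] (pvSeg_ne_nil xs)]
      simp
    · have hps : pvSeg (x :: xs) = (x :: (pvSeg xs).headD []) :: (pvSeg xs).tail := by
        simp [pvSeg, if_neg hx]
      simp only [List.foldl_cons]
      rw [if_neg hx, ih, hps]
      simp

-- B's index loop over a suffix of c, with a slice boundary at s ≤ k, yields the same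
theorem pvLoopB_eq (c : List String) : ∀ (rest : List String) (k s : Nat) (qs : List String),
    rest = c.drop k → s ≤ k →
    (let st := (PySem.List.enumerate rest (k : Int)).foldl
      (fun (st : List String × Int) (p : Int × String) =>
        if p.2 = "" then
          (st.1 ++ [PySem.Str.join "" (PySem.List.slice c (some st.2) (some p.1))], p.1 + 1)
        else st) (qs, (s : Int))
     st.1 ++ [PySem.Str.join "" (PySem.List.slice c (some st.2) none)])
    = qs ++ ((((c.drop s).take (k - s) ++ (pvSeg rest).headD []) :: (pvSeg rest).tail).map
        (PySem.Str.join "")) := by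
  intro rest
  induction rest with
  | nil =>
    intro k s qs hrest hs
    have hlen : c.length ≤ k := by
      have := congrArg List.length hrest
      simp at this; omega
    have htake : (c.drop s).take (k - s) = c.drop s := by
      apply List.take_of_length_le; simp; omega
    simp [PySem.List.enumerate, PySem.List.slice_from_natCast, pvSeg, htake]
  | cons x rest' ih =>
    intro k s qs hrest hs
    have hk : k < c.length := by
      by_contra h
      rw [List.drop_eq_nil_of_le (by omega)] at hrest
      simp at hrest
    rw [List.drop_eq_getElem_cons hk] at hrest
    injection hrest with hx0 hrest'
    have hcast : ((k : Int) + 1) = ((k + 1 : Nat) : Int) := by push_cast; ring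
    rw [PySem.List.enumerate_cons, hcast]
    by_cases hxe : x = ""
    · subst hxe
      have hps : pvSeg ("" :: rest') = [] :: pvSeg rest' := by simp [pvSeg]
      simp only [List.foldl_cons, if_true, hcast]
      rw [ih (k + 1) (k + 1) _ hrest' (le_refl _)]
      rw [hps]
      simp only [Nat.sub_self, List.take_zero, List.nil_append, List.headD_cons,
        List.tail_cons, List.map_cons, List.append_assoc, List.singleton_append,
        List.append_nil]
      conv_rhs => rw [← headD_cons_tail (pvSeg rest') [] (pvSeg_ne_nil rest')]
      simp [PySem.List.slice_natCast]
    · have hps : pvSeg (x :: rest') = (x :: (pvSeg rest').headD []) :: (pvSeg rest').tail := by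
        simp [pvSeg, if_neg hxe]
      simp only [List.foldl_cons, if_neg hxe]
      rw [ih (k + 1) s _ hrest' (by omega)]
      rw [hps]
      have htake : (c.drop s).take (k + 1 - s) = (c.drop s).take (k - s) ++ [x] := by
        have h1 : k + 1 - s = (k - s) + 1 := by omega
        rw [h1, List.take_succ]
        have : (c.drop s)[k - s]? = some x := by
          rw [List.getElem?_drop]
          have : s + (k - s) = k := by omega
          rw [this, List.getElem?_eq_getElem hk, ← hx0]
        simp [this]
      rw [htake]
      simp

-- ===== VERDICT (by name: the statement is the Claim_ definition above) =====
theorem extract_sql_from_database_creation_py_spec : Claim_equal_extract_sql_from_database_creation_py := by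
  intro raw _
  show _ = _
  unfold extract_sql_from_database_creation_py extract_sql_from_database_creation_py_alt
  simp only [PySem.List.foldl_append_singleton_eq_map, List.nil_append]
  rw [pvLoopA_eq]
  have hB := pvLoopB_eq (raw.map pvClean) (raw.map pvClean) 0 0 [] (by simp) (le_refl 0)
  simp only [Nat.cast_zero] at hB
  rw [hB]
  simp
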